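-- pv_equiv track=rewrite | github.com/Eisha-khan5/Digital-Image-Processing | 54_Shannon_fano.py | shannon_fano_decoding
-- ===== SOURCE A (Python) =====
-- def shannon_fano_decoding(encoded_data, codes):
--     reverse_codes = {v: k for k, v in codes.items()}
--     current_code = ""
--     decoded_data = []
--
--     for bit in encoded_data:
--         current_code += bit
--         if current_code in reverse_codes:
--             decoded_data.append(reverse_codes[current_code])
--             current_code = ""
--
--     return decoded_data
-- ===== SOURCE B (Python) =====
-- def shannon_fano_decoding(encoded_data, codes):
--     reverse_codes = {v: k for k, v in codes.items()}
--     decoded_data = []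
--     rest = encoded_data
--     while rest:
--         j = 1
--         while j <= len(rest) and rest[:j] not in reverse_codes:
--             j += 1
--         if j > len(rest):
--             break
--         decoded_data.append(reverse_codes[rest[:j]])
--         rest = rest[j:]
--     return decoded_data
-- ===== Notes on version B (the rewrite author's own statement) =====
-- stated objective: alternative
-- what changed: Replaces A's single streaming pass that accumulates bits in a growing current_code buffer with a cursor-and-jump decoder: at each position an inner scan finds the shortest prefix of the remaining bits that is a code, emits its symbol and jumps the cursor past it, stopping as soon as no prefix matches.
import Mathlib
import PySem

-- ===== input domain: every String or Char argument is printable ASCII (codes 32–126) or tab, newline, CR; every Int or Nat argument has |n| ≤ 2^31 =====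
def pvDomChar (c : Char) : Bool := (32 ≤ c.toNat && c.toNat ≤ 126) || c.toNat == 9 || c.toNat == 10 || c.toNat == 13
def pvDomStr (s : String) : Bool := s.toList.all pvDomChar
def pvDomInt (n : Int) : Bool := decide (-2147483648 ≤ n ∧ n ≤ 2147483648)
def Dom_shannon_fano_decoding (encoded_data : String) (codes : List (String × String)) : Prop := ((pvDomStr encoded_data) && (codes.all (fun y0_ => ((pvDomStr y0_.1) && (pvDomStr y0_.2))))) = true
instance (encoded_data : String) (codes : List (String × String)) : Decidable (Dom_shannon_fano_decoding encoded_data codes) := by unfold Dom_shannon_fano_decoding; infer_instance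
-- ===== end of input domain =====

-- B replaces A's single streaming pass with a cursor over the remaining bits that scans
-- for the SHORTEST matching prefix and then jumps past it (objective: alternative, same cost).

-- ===== PORT A =====
-- state: (current_code as a char list, decoded_data); `s in dict` + `dict[s]` ported as one get? match
def shannon_fano_decoding (encoded_data : String) (codes : List (String × String)) : List String :=
  let reverse_codes : PySem.Dict String String :=
    codes.foldl (fun d kv => d.insert kv.2 kv.1) PySem.Dict.empty
  (encoded_data.toList.foldl
    (fun (st : List Char × List String) bit =>
      let current_code := st.1 ++ [bit]
      match reverse_codes.get? (String.mk current_code) with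
      | some k => ([], st.2 ++ [k])
      | none => (current_code, st.2))
    ([], [])).2

-- ===== PORT B =====
-- inner while loop of Source B: smallest j ≥ start with rest[:j] in the dict (or the first j > len(rest))
def pvFindJ (rev : PySem.Dict String String) (rest : List Char) (j : Nat) : Nat :=
  if h : j ≤ rest.length ∧ (rev.get? (String.mk (rest.take j))).isNone = true then
    pvFindJ rev rest (j + 1)
  else j
termination_by rest.length + 1 - j
decreasing_by omega

-- needed for decodeLoop's termination
theorem pvFindJ_ge (rev : PySem.Dict String String) (rest : List Char) (j : Nat) :
    j ≤ pvFindJ rev rest j := by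
  rw [pvFindJ]
  split
  · exact Nat.le_trans (Nat.le_succ j) (pvFindJ_ge rev rest (j + 1))
  · exact Nat.le_refl j
termination_by rest.length + 1 - j
decreasing_by omega

-- outer while loop of Source B
def pvDecodeLoop (rev : PySem.Dict String String) (rest : List Char) : List String :=
  match hr : rest with
  | [] => []
  | _ :: _ =>
    let j := pvFindJ rev rest 1
    if hj : rest.length < j then []
    else
      match rev.get? (String.mk (rest.take j)) with
      | some k => k :: pvDecodeLoop rev (rest.drop j)
      | none => []    -- unreachable: pvFindJ only stops early on a hit
termination_by rest.length
decreasing_by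
  have h1 : 1 ≤ pvFindJ rev rest 1 := pvFindJ_ge rev rest 1
  simp_all [List.length_drop]

def shannon_fano_decoding_alt (encoded_data : String) (codes : List (String × String)) : List String :=
  let reverse_codes : PySem.Dict String String :=
    codes.foldl (fun d kv => d.insert kv.2 kv.1) PySem.Dict.empty
  pvDecodeLoop reverse_codes encoded_data.toList

-- ===== PRECONDITION & SPEC =====
def Spec_shannon_fano_decoding (encoded_data : String) (codes : List (String × String)) (out : List String) : Prop := out = shannon_fano_decoding_alt encoded_data codes
instance (encoded_data : String) (codes : List (String × String)) (out : List String) : Decidable (Spec_shannon_fano_decoding encoded_data codes out) := by unfold Spec_shannon_fano_decoding; infer_instance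

-- ===== CLAIM (what is proved, stated in full; the proofs are below) =====
def Claim_equal_shannon_fano_decoding : Prop := ∀ (encoded_data : String) (codes : List (String × String)), Dom_shannon_fano_decoding encoded_data codes → Spec_shannon_fano_decoding encoded_data codes (shannon_fano_decoding encoded_data codes)

-- ===== LEMMAS AND PROOFS =====

-- if no length in [j, j') matches, the scan from j equals the scan from j'
theorem pvFindJ_skip (rev : PySem.Dict String String) (rest : List Char) (j j' : Nat)
    (hle : j ≤ j') (hlen : j' ≤ rest.length + 1)
    (hnone : ∀ k, j ≤ k → k < j' → (rev.get? (String.mk (rest.take k))).isNone = true) :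
    pvFindJ rev rest j = pvFindJ rev rest j' := by
  rcases Nat.eq_or_lt_of_le hle with h | h
  · rw [h]
  · rw [pvFindJ]
    have hc : j ≤ rest.length ∧ (rev.get? (String.mk (rest.take j))).isNone = true :=
      ⟨by omega, hnone j (Nat.le_refl j) h⟩
    rw [dif_pos hc]
    exact pvFindJ_skip rev rest (j + 1) j' h hlen (fun k hk1 hk2 => hnone k (by omega) hk2)
termination_by j' - j
decreasing_by omega

-- the scan stops immediately on a hit
theorem pvFindJ_hit (rev : PySem.Dict String String) (rest : List Char) (j : Nat)
    (hsome : (rev.get? (String.mk (rest.take j))).isSome = true) :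
    pvFindJ rev rest j = j := by
  have hc : ¬ (j ≤ rest.length ∧ (rev.get? (String.mk (rest.take j))).isNone = true) := by
    rintro ⟨_, hn⟩
    rw [Option.isNone_iff_eq_none] at hn
    rw [hn] at hsome
    simp at hsome
  rw [pvFindJ, dif_neg hc]

-- the scan stops immediately past the end
theorem pvFindJ_gt (rev : PySem.Dict String String) (rest : List Char) (j : Nat)
    (hgt : rest.length < j) : pvFindJ rev rest j = j := by
  have hc : ¬ (j ≤ rest.length ∧ (rev.get? (String.mk (rest.take j))).isNone = true) := by
    rintro ⟨h1, _⟩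
    omega
  rw [pvFindJ, dif_neg hc]

-- unfolding pvDecodeLoop on a nonempty list
theorem pvDecodeLoop_cons (rev : PySem.Dict String String) (x : Char) (xs : List Char) :
    pvDecodeLoop rev (x :: xs) =
      (if (x :: xs).length < pvFindJ rev (x :: xs) 1 then []
       else
         match rev.get? (String.mk ((x :: xs).take (pvFindJ rev (x :: xs) 1))) with
         | some k => k :: pvDecodeLoop rev ((x :: xs).drop (pvFindJ rev (x :: xs) 1))
         | none => []) := by
  rw [pvDecodeLoop.eq_def]
  simp only [dite_eq_ite]

-- the invariant A's accumulator satisfies: no nonempty prefix is a code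
def pvNoPrefix (rev : PySem.Dict String String) (cur : List Char) : Prop :=
  ∀ k, 1 ≤ k → k ≤ cur.length → (rev.get? (String.mk (cur.take k))).isNone = true

theorem pvDecode_nil_of_noPrefix (rev : PySem.Dict String String) (cur : List Char)
    (h : pvNoPrefix rev cur) : pvDecodeLoop rev cur = [] := by
  match cur with
  | [] => rw [pvDecodeLoop.eq_def]
  | c :: cs =>
    rw [pvDecodeLoop_cons]
    have hskip : pvFindJ rev (c :: cs) 1 = pvFindJ rev (c :: cs) ((c :: cs).length + 1) :=
      pvFindJ_skip rev (c :: cs) 1 ((c :: cs).length + 1) (by simp) (Nat.le_refl _)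
        (fun k hk1 hk2 => h k hk1 (by omega))
    have hgt : pvFindJ rev (c :: cs) ((c :: cs).length + 1) = (c :: cs).length + 1 :=
      pvFindJ_gt rev (c :: cs) _ (by omega)
    rw [if_pos (by rw [hskip, hgt]; omega)]

-- one iteration of A's loop body, beta/zeta-reduced
theorem pvStep_eq (rev : PySem.Dict String String) (cur : List Char) (acc : List String) (b : Char) :
    (let current_code := (cur, acc).1 ++ [b]
     match rev.get? (String.mk current_code) with
     | some k => ([], (cur, acc).2 ++ [k])
     | none => (current_code, (cur, acc).2))
    = (match rev.get? (String.mk (cur ++ [b])) with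
       | some k => ([], acc ++ [k])
       | none => (cur ++ [b], acc)) := rfl

-- main invariant: A's fold from state (cur, acc) equals acc ++ B's decode of cur ++ bits
theorem pvFold_eq_decode (rev : PySem.Dict String String) (bits : List Char) :
    ∀ (cur : List Char) (acc : List String), pvNoPrefix rev cur →
    (bits.foldl
      (fun (st : List Char × List String) bit =>
        let current_code := st.1 ++ [bit]
        match rev.get? (String.mk current_code) with
        | some k => ([], st.2 ++ [k])
        | none => (current_code, st.2))
      (cur, acc)).2 = acc ++ pvDecodeLoop rev (cur ++ bits) := by
  induction bits with
  | nil =>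
    intro cur acc h
    simp [pvDecode_nil_of_noPrefix rev cur h]
  | cons b bs ih =>
    intro cur acc h
    rw [List.foldl_cons, pvStep_eq]
    cases hg : rev.get? (String.mk (cur ++ [b])) with
    | none =>
      have h' : pvNoPrefix rev (cur ++ [b]) := by
        intro k hk1 hk2
        simp at hk2
        by_cases hk : k ≤ cur.length
        · rw [List.take_append_of_le_length hk]
          exact h k hk1 hk
        · have hke : k = cur.length + 1 := by omega
          subst hke
          rw [show cur.length + 1 = (cur ++ [b]).length by simp, List.take_length]
          simp [hg]
      have hih := ih (cur ++ [b]) acc h'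
      have hred : (match (none : Option String) with
        | some k => (([] : List Char), acc ++ [k])
        | none => (cur ++ [b], acc)) = (cur ++ [b], acc) := rfl
      rw [hred, hih]
      simp
    | some k =>
      have h0 : pvNoPrefix rev ([] : List Char) := by
        intro m h1 h2
        simp at h2
        omega
      have hih := ih [] (acc ++ [k]) h0
      have hred : (match (some k : Option String) with
        | some k => (([] : List Char), acc ++ [k])
        | none => (cur ++ [b], acc)) = ([], acc ++ [k]) := rfl
      rw [hred, hih]
      -- now compute pvDecodeLoop rev (cur ++ b :: bs)
      have hre : cur ++ b :: bs = (cur ++ [b]) ++ bs := by simp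
      rw [hre]
      have hlen1 : cur.length + 1 ≤ ((cur ++ [b]) ++ bs).length := by simp
      have hskip : pvFindJ rev ((cur ++ [b]) ++ bs) 1 = pvFindJ rev ((cur ++ [b]) ++ bs) (cur.length + 1) := by
        apply pvFindJ_skip
        · omega
        · omega
        · intro m hm1 hm2
          have hmle : m ≤ cur.length := by omega
          rw [List.take_append_of_le_length (by simp; omega)]
          rw [List.take_append_of_le_length hmle]
          exact h m hm1 hmle
      have htake : ((cur ++ [b]) ++ bs).take (cur.length + 1) = cur ++ [b] := by
        rw [show cur.length + 1 = (cur ++ [b]).length by simp]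
        exact List.take_left
      have hhit : pvFindJ rev ((cur ++ [b]) ++ bs) (cur.length + 1) = cur.length + 1 := by
        apply pvFindJ_hit
        rw [htake, hg]
        rfl
      have hdrop : ((cur ++ [b]) ++ bs).drop (cur.length + 1) = bs := by
        rw [show cur.length + 1 = (cur ++ [b]).length by simp]
        exact List.drop_left
      obtain ⟨x, xs, hm⟩ : ∃ x xs, (cur ++ [b]) ++ bs = x :: xs := by
        cases hc : (cur ++ [b]) ++ bs with
        | nil => simp at hc
        | cons x xs => exact ⟨x, xs, rfl⟩
      rw [hm] at hskip hhit htake hdrop hlen1 ⊢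
      rw [pvDecodeLoop_cons, hskip, hhit]
      rw [if_neg (by omega)]
      rw [htake, hg, hdrop]
      simp

-- ===== VERDICT (by name: the statement is the Claim_ definition above) =====
theorem shannon_fano_decoding_spec : Claim_equal_shannon_fano_decoding := by
  intro encoded_data codes _
  unfold Spec_shannon_fano_decoding shannon_fano_decoding shannon_fano_decoding_alt
  have h0 : pvNoPrefix (codes.foldl (fun d kv => d.insert kv.2 kv.1) PySem.Dict.empty) ([] : List Char) := by
    intro m h1 h2
    simp at h2
    omega
  have := pvFold_eq_decode (codes.foldl (fun d kv => d.insert kv.2 kv.1) PySem.Dict.empty)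
    encoded_data.toList [] [] h0
  simpa using this
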